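-- pv_equiv track=rewrite | github.com/abogatyrev80/goodroad-2 | backend/clustering.py | _are_types_compatible
-- ===== SOURCE A (Python) =====
-- def _are_types_compatible(type1: str, type2: str) -> bool:
--     """
--     Проверяет совместимы ли два типа событий для объединения в кластер
--     """
--     # Группы совместимых типов
--     compatible_groups = [
--         {'pothole', 'bump'},           # Ямы и неровности
--         {'speed_bump'},                # Лежачие полицейские (отдельно)
--         {'braking'},                   # Торможения (отдельно)
--         {'vibration'},                 # Вибрации (отдельно)
--     ]
--
--     for group in compatible_groups:
--         if type1 in group and type2 in group:
--             return True
--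
--     return False
-- ===== SOURCE B (Python) =====
-- def _are_types_compatible(type1: str, type2: str) -> bool:
--     groups = {'pothole': 0, 'bump': 0, 'speed_bump': 1, 'braking': 2, 'vibration': 3}
--     g1 = groups.get(type1)
--     g2 = groups.get(type2)
--     return g1 is not None and g1 == g2
-- ===== Notes on version B (the rewrite author's own statement) =====
-- stated objective: idiomatic
-- what changed: Replaces the scan over a list of compatibility sets with a precomputed type->group-id dict and two lookups compared for equality (with a None guard).
import Mathlib
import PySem

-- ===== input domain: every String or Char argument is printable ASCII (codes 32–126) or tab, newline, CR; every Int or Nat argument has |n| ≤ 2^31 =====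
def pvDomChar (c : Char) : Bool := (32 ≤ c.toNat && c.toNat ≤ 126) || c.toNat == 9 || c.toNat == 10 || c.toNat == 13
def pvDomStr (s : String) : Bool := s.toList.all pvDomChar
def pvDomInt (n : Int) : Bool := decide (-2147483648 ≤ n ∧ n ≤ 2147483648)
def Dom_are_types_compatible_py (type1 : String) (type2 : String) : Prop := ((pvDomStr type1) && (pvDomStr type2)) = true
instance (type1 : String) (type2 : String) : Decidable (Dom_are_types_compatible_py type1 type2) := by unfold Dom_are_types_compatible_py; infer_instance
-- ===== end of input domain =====

-- B replaces A's scan over compatibility sets by a type→group-id dict and two lookups (idiomatic; same behaviour).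

-- ===== PORT A =====
-- scan over the list of compatible groups, returning True on the first group containing both types
def are_types_compatible_py (type1 : String) (type2 : String) : Bool :=
  let compatible_groups : List (PySem.Set String) :=
    [PySem.Set.ofList ["pothole", "bump"],
     PySem.Set.ofList ["speed_bump"],
     PySem.Set.ofList ["braking"],
     PySem.Set.ofList ["vibration"]]
  compatible_groups.any (fun group => PySem.Set.contains group type1 && PySem.Set.contains group type2)

-- ===== PORT B =====
-- dict lookup of a group id for each type; compatible iff both defined and equal
def are_types_compatible_py_alt (type1 : String) (type2 : String) : Bool :=
  let groups : PySem.Dict String Int :=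
    PySem.Dict.ofList [("pothole", 0), ("bump", 0), ("speed_bump", 1), ("braking", 2), ("vibration", 3)]
  let g1 := groups.get? type1
  let g2 := groups.get? type2
  g1.isSome && (g1 == g2)

-- ===== PRECONDITION & SPEC =====
def Spec_are_types_compatible_py (type1 : String) (type2 : String) (out : Bool) : Prop := out = are_types_compatible_py_alt type1 type2
instance (type1 : String) (type2 : String) (out : Bool) : Decidable (Spec_are_types_compatible_py type1 type2 out) := by unfold Spec_are_types_compatible_py; infer_instance

-- ===== CLAIM (what is proved, stated in full; the proofs are below) =====
def Claim_equal_are_types_compatible_py : Prop := ∀ (type1 : String) (type2 : String), Dom_are_types_compatible_py type1 type2 → Spec_are_types_compatible_py type1 type2 (are_types_compatible_py type1 type2)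

-- ===== LEMMAS AND PROOFS =====

lemma groups_get (t : String) :
    (PySem.Dict.ofList [("pothole", (0:Int)), ("bump", 0), ("speed_bump", 1), ("braking", 2), ("vibration", 3)]).get? t =
      if t = "pothole" then some 0 else if t = "bump" then some 0 else if t = "speed_bump" then some 1
      else if t = "braking" then some 2 else if t = "vibration" then some 3 else none := by
  have h : PySem.Dict.ofList [("pothole", (0:Int)), ("bump", 0), ("speed_bump", 1), ("braking", 2), ("vibration", 3)] =
      PySem.Dict.mk [("pothole", (0:Int)), ("bump", 0), ("speed_bump", 1), ("braking", 2), ("vibration", 3)] := by decide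
  rw [h]
  simp only [PySem.Dict.get?_mk_cons, beq_iff_eq]
  by_cases a : t = "pothole" <;> by_cases b : t = "bump" <;> by_cases c : t = "speed_bump" <;>
    by_cases d : t = "braking" <;> by_cases e : t = "vibration" <;>
    simp [a, b, c, d, e, eq_comm, PySem.Dict.get?]

-- ===== VERDICT (by name: the statement is the Claim_ definition above) =====
theorem are_types_compatible_py_spec : Claim_equal_are_types_compatible_py := by
  intro t1 t2 _
  unfold Spec_are_types_compatible_py are_types_compatible_py are_types_compatible_py_alt
  simp only [groups_get, List.any_cons, List.any_nil]
  by_cases h1 : t1 = "pothole" <;> by_cases h2 : t1 = "bump" <;>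
  by_cases h3 : t1 = "speed_bump" <;> by_cases h4 : t1 = "braking" <;>
  by_cases h5 : t1 = "vibration" <;>
  by_cases k1 : t2 = "pothole" <;> by_cases k2 : t2 = "bump" <;>
  by_cases k3 : t2 = "speed_bump" <;> by_cases k4 : t2 = "braking" <;>
  by_cases k5 : t2 = "vibration" <;>
  simp_all [PySem.Set.mem_ofList]
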